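-- pv_equiv track=rewrite | github.com/rebibabo/SCTS | c/transform1_blank.py | get_indent
-- ===== SOURCE A (Python) =====
-- def get_indent(start_byte: int, code: str) -> int:
--     indent = 0
--     i = start_byte
--     while i >= 0 and code[i] != '\n':
--         if code[i] == ' ':
--             indent += 1
--         elif code[i] == '\t':
--             indent += 4
--         i -= 1
--     return indent
-- ===== SOURCE B (Python) =====
-- def get_indent(start_byte: int, code: str) -> int:
--     indent = 0
--     for j in range(start_byte + 1):
--         c = code[j]
--         if c == '\n':
--             indent = 0
--         elif c == ' ':
--             indent += 1
--         elif c == '\t':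
--             indent += 4
--     return indent
-- ===== Notes on version B (the rewrite author's own statement) =====
-- stated objective: alternative
-- what changed: B replaces A's backward scan from start_byte to the previous newline with a single forward pass over code[0:start_byte+1] that resets the accumulator to 0 at each newline.
import Mathlib
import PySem

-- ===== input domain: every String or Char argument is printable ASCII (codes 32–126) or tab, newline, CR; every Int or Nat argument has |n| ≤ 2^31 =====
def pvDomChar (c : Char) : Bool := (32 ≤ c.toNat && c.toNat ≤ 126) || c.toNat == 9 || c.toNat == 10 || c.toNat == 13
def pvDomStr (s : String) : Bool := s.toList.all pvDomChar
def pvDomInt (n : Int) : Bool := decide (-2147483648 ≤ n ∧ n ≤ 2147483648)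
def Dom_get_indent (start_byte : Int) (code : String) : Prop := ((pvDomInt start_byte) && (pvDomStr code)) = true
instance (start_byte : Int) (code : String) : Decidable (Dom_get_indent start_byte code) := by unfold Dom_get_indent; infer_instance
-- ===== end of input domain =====

-- B replaces A's backward scan to the previous newline with one forward pass over
-- code[0:start_byte+1] that resets the accumulator at each newline (alternative decomposition).


-- ===== PORT A =====
-- A's backward while-loop; pyGet? = none is Python's IndexError (those inputs are outside Pre_)
def get_indent_loopA (cs : List Char) (i : Int) (indent : Int) : Int :=
  if _h : 0 ≤ i then
    match PySem.List.pyGet? cs i with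
    | none => indent
    | some c =>
      if c = '\n' then indent
      else if c = ' ' then get_indent_loopA cs (i - 1) (indent + 1)
      else if c = '\t' then get_indent_loopA cs (i - 1) (indent + 4)
      else get_indent_loopA cs (i - 1) indent
  else indent
termination_by (i + 1).toNat
decreasing_by all_goals omega

def get_indent (start_byte : Int) (code : String) : Int :=
  get_indent_loopA code.toList start_byte 0

-- ===== PORT B =====
-- one step of B's forward loop; the pyGetD default is never read inside Pre_ (j < length)
def get_indent_step (cs : List Char) (indent : Int) (j : Int) : Int :=
  let c := PySem.List.pyGetD cs j '\n'
  if c = '\n' then 0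
  else if c = ' ' then indent + 1
  else if c = '\t' then indent + 4
  else indent

def get_indent_alt (start_byte : Int) (code : String) : Int :=
  (PySem.List.pyRange 0 (start_byte + 1) 1).foldl (get_indent_step code.toList) 0

-- ===== PRECONDITION & SPEC =====
-- Pre_ excludes exactly the inputs where Python A raises IndexError: start_byte ≥ len(code)
def Pre_get_indent (start_byte : Int) (code : String) : Prop :=
  start_byte < (code.toList.length : Int)
instance (start_byte : Int) (code : String) : Decidable (Pre_get_indent start_byte code) := by unfold Pre_get_indent; infer_instance

def pvWitness_get_indent : Int × String := (2, "  x")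

def Spec_get_indent (start_byte : Int) (code : String) (out : Int) : Prop := out = get_indent_alt start_byte code
instance (start_byte : Int) (code : String) (out : Int) : Decidable (Spec_get_indent start_byte code out) := by unfold Spec_get_indent; infer_instance

-- ===== CLAIM (what is proved, stated in full; the proofs are below) =====
def Claim_equal_get_indent : Prop := ∀ (start_byte : Int) (code : String), Dom_get_indent start_byte code → Pre_get_indent start_byte code → Spec_get_indent start_byte code (get_indent start_byte code)

-- ===== LEMMAS AND PROOFS =====

-- A's loop with accumulator ind equals ind plus the loop started at 0
lemma loopA_shift : ∀ (n : Nat) (cs : List Char) (i ind : Int), (i + 1).toNat ≤ n →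
    get_indent_loopA cs i ind = ind + get_indent_loopA cs i 0 := by
  intro n
  induction n with
  | zero =>
    intro cs i ind h
    have h0 : ¬ (0 ≤ i) := by omega
    rw [get_indent_loopA]
    conv_rhs => rw [get_indent_loopA]
    simp [h0]
  | succ n ih =>
    intro cs i ind h
    rw [get_indent_loopA]
    conv_rhs => rw [get_indent_loopA]
    by_cases h0 : 0 ≤ i
    · simp only [h0, dif_pos]
      cases hg : PySem.List.pyGet? cs i with
      | none => simp
      | some c =>
        by_cases hnl : c = '\n'
        · simp [hnl]
        · by_cases hsp : c = ' '
          · subst hsp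
            simp only [if_neg hnl, if_true]
            rw [ih cs (i-1) (ind+1) (by omega), ih cs (i-1) (0+1) (by omega)]
            ring
          · by_cases htb : c = '\t'
            · subst htb
              simp only [if_neg hnl, if_neg hsp, if_true]
              rw [ih cs (i-1) (ind+4) (by omega), ih cs (i-1) (0+4) (by omega)]
              ring
            · simp only [if_neg hnl, if_neg hsp, if_neg htb]
              rw [ih cs (i-1) ind (by omega)]
    · simp [h0]

-- B's forward fold up to i equals A's backward loop from i, for i < length
lemma forward_eq_backward : ∀ (n : Nat) (cs : List Char) (i : Int), (i + 1).toNat ≤ n →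
    i < (cs.length : Int) →
    (PySem.List.pyRange 0 (i + 1) 1).foldl (get_indent_step cs) 0 = get_indent_loopA cs i 0 := by
  intro n
  induction n with
  | zero =>
    intro cs i h hlen
    have hi : i + 1 ≤ 0 := by omega
    have h0 : ¬ (0 ≤ i) := by omega
    rw [PySem.List.pyRange_one_eq_nil hi, get_indent_loopA]
    simp [h0]
  | succ n ih =>
    intro cs i h hlen
    by_cases h0 : 0 ≤ i
    · rw [PySem.List.pyRange_one_succ_right h0, List.foldl_append]
      have hih : (PySem.List.pyRange 0 i 1).foldl (get_indent_step cs) 0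
          = get_indent_loopA cs (i - 1) 0 := by
        have heq : PySem.List.pyRange 0 i 1 = PySem.List.pyRange 0 ((i - 1) + 1) 1 := by ring_nf
        rw [heq]; exact ih cs (i - 1) (by omega) (by omega)
      have hget : PySem.List.pyGet? cs i = some cs[i.toNat] :=
        PySem.List.pyGet?_eq_some_getElem cs h0 hlen
      have hgetD : PySem.List.pyGetD cs i '\n' = cs[i.toNat] := by
        simp [PySem.List.pyGetD, hget]
      have hA : get_indent_loopA cs i 0 =
          if cs[i.toNat] = '\n' then 0
          else if cs[i.toNat] = ' ' then get_indent_loopA cs (i - 1) 1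
          else if cs[i.toNat] = '\t' then get_indent_loopA cs (i - 1) 4
          else get_indent_loopA cs (i - 1) 0 := by
        conv_lhs => rw [get_indent_loopA]
        simp [h0, hget]
      rw [hih, hA]
      simp only [List.foldl_cons, List.foldl_nil, get_indent_step, hgetD]
      by_cases hnl : cs[i.toNat] = '\n'
      · simp [hnl]
      · by_cases hsp : cs[i.toNat] = ' '
        · simp [hsp]
          rw [loopA_shift (i.toNat + 1) cs (i - 1) 1 (by omega)]
          ring
        · by_cases htb : cs[i.toNat] = '\t'
          · simp [htb]
            rw [loopA_shift (i.toNat + 1) cs (i - 1) 4 (by omega)]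
            ring
          · simp [hnl, hsp, htb]
    · have hi : i + 1 ≤ 0 := by omega
      rw [PySem.List.pyRange_one_eq_nil hi, get_indent_loopA]
      simp [h0]

-- ===== VERDICT (by name: the statement is the Claim_ definition above) =====
theorem get_indent_spec : Claim_equal_get_indent := by
  intro start_byte code _dom pre
  unfold Spec_get_indent get_indent get_indent_alt
  exact (forward_eq_backward ((start_byte + 1).toNat) code.toList start_byte (by omega) pre).symm
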